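-- pv_equiv track=rewrite | github.com/yeraydiazdiaz/sublime-rest-client | rest_client/parser.py | _parse_url_section
-- ===== SOURCE A (Python) =====
-- from typing import Dict, List, Mapping, Optional, Tuple
--
-- class ParserError(Exception):
--     pass
--
-- def _parse_url_section(
--     url_section: str,
-- ) -> Tuple[str, str, Optional[Mapping[str, str]]]:
--     method = "GET"
--     headers = None
--     [url, *query_params_header_lines] = url_section.splitlines()
--     if " " in url:
--         method, url = url.split(maxsplit=1)
--
--     header_lines: List[str] = []
--     for line in query_params_header_lines:
--         if line.startswith(" ") or line.startswith("\t"):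
--             if not header_lines:
--                 url += line.strip()
--             else:
--                 raise ParserError("Query parameter lines must follow the URL line")
--         else:
--             header_lines.append(line)
--
--     headers = _parse_headers_section(header_lines)
--
--     return method, url, headers
--
-- def _parse_headers_section(
--     headers_section: List[str],
-- ) -> Optional[Mapping[str, str]]:
--     headers = {}
--     for line in headers_section:
--         key, value = line.split(":", maxsplit=1)
--         headers[key.strip()] = value.strip()
--
--     return headers if headers else None
-- ===== SOURCE B (Python) =====
-- from typing import List, Mapping, Optional, Tuple
--
--
-- class ParserError(Exception):
--     pass
--
--
-- def _parse_url_section(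
--     url_section: str,
-- ) -> Tuple[str, str, Optional[Mapping[str, str]]]:
--     # Back-to-front scan: walking the tail lines in REVERSE, header lines form
--     # the (non-indented) suffix; once an indented line is seen, any further
--     # non-indented line would mean an indented line after a header -> error.
--     [url, *rest] = url_section.splitlines()
--     method = "GET"
--     if " " in url:
--         method, url = url.split(maxsplit=1)
--
--     header_lines: List[str] = []
--     continuations: List[str] = []
--     seen_indented = False
--     for line in reversed(rest):
--         if line.startswith(" ") or line.startswith("\t"):
--             seen_indented = True
--             continuations.append(line.strip())
--         elif seen_indented:
--             raise ParserError("Query parameter lines must follow the URL line")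
--         else:
--             header_lines.append(line)
--
--     url += "".join(reversed(continuations))
--     header_lines.reverse()
--     headers = dict(
--         (key.strip(), value.strip())
--         for key, value in (line.split(":", maxsplit=1) for line in header_lines)
--     )
--     return method, url, headers or None
-- ===== Notes on version B (the rewrite author's own statement) =====
-- stated objective: alternative
-- what changed: Replaces A's forward interleaved classify loop (url/header_lines state, raising on a late indented line) with a single BACKWARD scan over reversed(rest): header lines are collected as the non-indented suffix, continuation strips are accumulated in reverse and joined back-to-front into the url, and the error is detected as a non-indented line seen after an indented one.
import Mathlib
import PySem

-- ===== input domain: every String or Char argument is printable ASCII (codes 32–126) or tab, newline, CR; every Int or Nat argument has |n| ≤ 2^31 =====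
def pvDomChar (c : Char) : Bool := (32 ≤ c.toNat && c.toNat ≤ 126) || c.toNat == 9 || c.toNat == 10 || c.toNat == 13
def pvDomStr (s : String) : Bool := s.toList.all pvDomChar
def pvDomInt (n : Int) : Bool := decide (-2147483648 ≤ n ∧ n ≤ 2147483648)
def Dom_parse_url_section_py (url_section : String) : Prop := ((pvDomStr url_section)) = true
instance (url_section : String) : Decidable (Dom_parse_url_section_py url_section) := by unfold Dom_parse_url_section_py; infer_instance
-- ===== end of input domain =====

-- B replaces A's forward interleaved classify loop by a single backward scan over the reversed tail (headers = non-indented suffix, continuations accumulated and joined back-to-front); same cost, different traversal. Return-value equivalence only: neither program mutates its argument.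

-- ===== PORT A =====
-- line.startswith(" ") or line.startswith("\t")
def pvIndented (l : String) : Bool :=
  PySem.Str.startswith l " " || PySem.Str.startswith l "\t"

-- method, url = url.split(maxsplit=1) guarded by '" " in url' (2-element unpack; other lengths raise ValueError, excluded by Pre_)
def pvMethodSplit (url : String) : String × String :=
  if PySem.Str.isIn " " url then
    match PySem.Str.split₀Max url 1 with
    | [m, u] => (m, u)
    | _ => ("GET", url)   -- ValueError in Python; outside Pre_
  else ("GET", url)

-- _parse_headers_section: dict built line by line; a line without ':' raises ValueError (outside Pre_), here skipped
def pvParseHeaders (lines : List String) : Option (List (String × String)) :=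
  let d := lines.foldl (fun d l =>
    match PySem.Str.splitMax? l ":" 1 with
    | some [k, v] => d.insert (PySem.Str.strip k) (PySem.Str.strip v)
    | _ => d) (PySem.Dict.empty : PySem.Dict String String)
  if d.items.isEmpty then none else some d.items

-- A's for-loop over the remaining lines, state (url, header_lines); the ParserError branch (outside Pre_) stops with the current state
def pvALoop (url : String) (hdr : List String) : List String → String × List String
  | [] => (url, hdr)
  | l :: ls =>
    if pvIndented l then
      if hdr.isEmpty then pvALoop (url ++ PySem.Str.strip l) hdr ls
      else (url, hdr)   -- raise ParserError; outside Pre_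
    else pvALoop url (hdr ++ [l]) ls

def parse_url_section_py (url_section : String) : String × String × (Option (List (String × String))) :=
  match PySem.Str.splitlines url_section with
  | [] => ("GET", "", none)   -- ValueError on unpacking; outside Pre_
  | url :: rest =>
    let mu := pvMethodSplit url
    let st := pvALoop mu.2 [] rest
    (mu.1, st.1, pvParseHeaders st.2)

-- ===== PORT B =====
-- B's backward for-loop over reversed(rest), state (header_lines, continuations, seen_indented);
-- none = ParserError (outside Pre_)
def pvBLoop (hdr cont : List String) (seen : Bool) : List String → Option (List String × List String)
  | [] => some (hdr, cont)
  | l :: ls =>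
    if pvIndented l then pvBLoop hdr (cont ++ [PySem.Str.strip l]) true ls
    else if seen then none   -- raise ParserError; outside Pre_
    else pvBLoop (hdr ++ [l]) cont seen ls

def parse_url_section_py_alt (url_section : String) : String × String × (Option (List (String × String))) :=
  match PySem.Str.splitlines url_section with
  | [] => ("GET", "", none)   -- ValueError on unpacking; outside Pre_
  | url :: rest =>
    let mu := pvMethodSplit url
    match pvBLoop [] [] false rest.reverse with
    | none => ("GET", "", none)   -- raise ParserError; outside Pre_
    | some (hdr, cont) =>
      let url2 := mu.2 ++ PySem.Str.join "" cont.reverse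
      let hdr2 := hdr.reverse
      let d := hdr2.foldl (fun d l =>
        match PySem.Str.splitMax? l ":" 1 with
        | some [k, v] => d.insert (PySem.Str.strip k) (PySem.Str.strip v)
        | _ => d) (PySem.Dict.empty : PySem.Dict String String)
      (mu.1, url2, if d.items.isEmpty then none else some d.items)

-- ===== PRECONDITION & SPEC =====
-- Pre_ excludes exactly the inputs where A raises: the empty section (ValueError on unpacking), a first line whose
-- whitespace split is not a 2-element unpack (ValueError), an indented line after a header line (ParserError),
-- and a header line without ':' (ValueError).
def Pre_parse_url_section_py (url_section : String) : Prop :=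
  PySem.Str.splitlines url_section ≠ [] ∧
  (PySem.Str.isIn " " (PySem.Str.splitlines url_section).head! = true →
    (PySem.Str.split₀Max (PySem.Str.splitlines url_section).head! 1).length = 2) ∧
  ∀ l ∈ (PySem.Str.splitlines url_section).tail.dropWhile pvIndented,
    pvIndented l = false ∧ PySem.Str.isIn ":" l = true
instance (url_section : String) : Decidable (Pre_parse_url_section_py url_section) := by
  unfold Pre_parse_url_section_py; infer_instance

def pvWitness_parse_url_section_py : String := "GET http://x\n  ?a=1\nA: b\nC:d"

def Spec_parse_url_section_py (url_section : String) (out : String × String × (Option (List (String × String)))) : Prop := out = parse_url_section_py_alt url_section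
instance (url_section : String) (out : String × String × (Option (List (String × String)))) : Decidable (Spec_parse_url_section_py url_section out) := by unfold Spec_parse_url_section_py; infer_instance

-- ===== CLAIM (what is proved, stated in full; the proofs are below) =====
def Claim_equal_parse_url_section_py : Prop := ∀ (url_section : String), Dom_parse_url_section_py url_section → Pre_parse_url_section_py url_section → Spec_parse_url_section_py url_section (parse_url_section_py url_section)

-- ===== LEMMAS AND PROOFS =====

-- once header lines have started, if every remaining line is non-indented A's loop just appends them all
theorem pvALoop_all_not_indented (url : String) (hdr : List String) (ls : List String)
    (h : ∀ l ∈ ls, pvIndented l = false) :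
    pvALoop url hdr ls = (url, hdr ++ ls) := by
  induction ls generalizing hdr with
  | nil => simp [pvALoop]
  | cons l ls ih =>
    have hl : pvIndented l = false := h l (by simp)
    simp [pvALoop, hl, ih (hdr ++ [l]) (fun x hx => h x (by simp [hx]))]

-- A's loop from empty header state = strip-fold of the indented prefix, then the non-indented block as headers
theorem pvALoop_phase (url : String) (ls : List String)
    (h : ∀ l ∈ ls.dropWhile pvIndented, pvIndented l = false) :
    pvALoop url [] ls =
      ((ls.takeWhile pvIndented).foldl (fun u l => u ++ PySem.Str.strip l) url,
       ls.dropWhile pvIndented) := by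
  induction ls generalizing url with
  | nil => simp [pvALoop]
  | cons l ls ih =>
    by_cases hl : pvIndented l = true
    · simp only [List.takeWhile_cons, List.dropWhile_cons, hl, if_pos]
      rw [List.dropWhile_cons_of_pos (by simp [hl])] at h
      simp [pvALoop, hl, List.isEmpty_nil, ih (url ++ PySem.Str.strip l) h]
    · have hl' : pvIndented l = false := by simpa using hl
      simp only [List.takeWhile_cons, List.dropWhile_cons, hl', Bool.false_eq_true, if_neg,
        not_false_iff]
      rw [List.dropWhile_cons_of_neg (by simp [hl'])] at h
      simp [pvALoop, hl', pvALoop_all_not_indented url [l] ls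
        (fun x hx => h x (List.mem_cons_of_mem _ hx)), List.foldl_nil]

-- B's backward loop over an all-non-indented block (seen = false) just appends the block to hdr
theorem pvBLoop_headers (hdr cont : List String) (ls ks : List String)
    (h : ∀ l ∈ ls, pvIndented l = false) :
    pvBLoop hdr cont false (ls ++ ks) = pvBLoop (hdr ++ ls) cont false ks := by
  induction ls generalizing hdr with
  | nil => simp
  | cons l ls ih =>
    have hl : pvIndented l = false := h l (by simp)
    simp [pvBLoop, hl, ih (hdr ++ [l]) (fun x hx => h x (by simp [hx]))]

-- B's backward loop over an all-indented block appends the strips to cont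
theorem pvBLoop_cont (hdr cont : List String) (seen : Bool) (ls : List String)
    (h : ∀ l ∈ ls, pvIndented l = true) :
    pvBLoop hdr cont seen ls = some (hdr, cont ++ ls.map PySem.Str.strip) := by
  induction ls generalizing cont seen with
  | nil => simp [pvBLoop]
  | cons l ls ih =>
    have hl : pvIndented l = true := h l (by simp)
    simp [pvBLoop, hl, ih (cont ++ [PySem.Str.strip l]) true (fun x hx => h x (by simp [hx]))]

-- flattening is unchanged by interspersing the empty separator (= ''.join concatenates)
theorem pvFlatInt {α : Type} (xs : List (List α)) :
    (List.intersperse [] xs).flatten = xs.flatten := by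
  induction xs with
  | nil => simp
  | cons a l ih =>
    cases l with
    | nil => simp
    | cons b m =>
      simp only [List.intersperse] at *
      simp_all

theorem pvJoinCons (l : String) (ls : List String) :
    PySem.Str.join "" (l :: ls) = l ++ PySem.Str.join "" ls := by
  apply String.toList_inj.mp
  simp [PySem.Str.toList_join, PySem.Chars.join, List.intercalate, pvFlatInt]

theorem pvJoinNil : PySem.Str.join "" ([] : List String) = "" := by
  apply String.toList_inj.mp
  simp [PySem.Str.toList_join, PySem.Chars.join, List.intercalate]

-- A's strip-fold equals appending the empty-separator join of the strips
theorem foldl_strip_eq_join (ls : List String) (url : String) :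
    ls.foldl (fun u l => u ++ PySem.Str.strip l) url
      = url ++ PySem.Str.join "" (ls.map PySem.Str.strip) := by
  induction ls generalizing url with
  | nil => simp [pvJoinNil]
  | cons l ls ih =>
    rw [List.foldl_cons, ih, List.map_cons, pvJoinCons, String.append_assoc]

-- ===== VERDICT (by name: the statement is the Claim_ definition above) =====
theorem parse_url_section_py_spec : Claim_equal_parse_url_section_py := by
  intro s _ hpre
  obtain ⟨hne, _, htail⟩ := hpre
  unfold Spec_parse_url_section_py parse_url_section_py parse_url_section_py_alt
  cases hsl : PySem.Str.splitlines s with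
  | nil => exact absurd hsl hne
  | cons url rest =>
    rw [hsl] at htail
    simp only [List.tail_cons] at htail
    have hnoind : ∀ l ∈ rest.dropWhile pvIndented, pvIndented l = false :=
      fun l hl => (htail l hl).1
    have hind : ∀ l ∈ rest.takeWhile pvIndented, pvIndented l = true :=
      fun l hl => List.mem_takeWhile_imp hl
    have hsplit : rest.reverse
        = (rest.dropWhile pvIndented).reverse ++ (rest.takeWhile pvIndented).reverse := by
      rw [← List.reverse_append, List.takeWhile_append_dropWhile]
    have hB : pvBLoop [] [] false rest.reverse
        = some ((rest.dropWhile pvIndented).reverse,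
                ((rest.takeWhile pvIndented).map PySem.Str.strip).reverse) := by
      rw [hsplit, pvBLoop_headers [] [] _ _ (fun l hl => hnoind l (List.mem_reverse.mp hl)),
        pvBLoop_cont _ _ _ _ (fun l hl => hind l (List.mem_reverse.mp hl))]
      simp [List.map_reverse]
    simp [pvALoop_phase _ _ hnoind, hB, pvParseHeaders, foldl_strip_eq_join]
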